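-- pv_equiv track=rewrite | github.com/zakvdm/ZakProjectEuler | src/solution/24.py | countPermutationsUpTo
-- ===== SOURCE A (Python) =====
-- import math
--
-- def countPermutationsUpTo(chars, foundSoFar, target):
--     """
--     >>> countPermutationsUpTo('012', 0, 3)
--     ('1', 2)
--     >>> countPermutationsUpTo('02', 2, 3)
--     ('0', 2)
--     >>> countPermutationsUpTo('2', 2, 3)
--     ('2', 3)
--     >>> countPermutationsUpTo('012', 0, 5)
--     ('2', 4)
--     """
--     # Hold chars[0] constant, and count permutations
--     if len(chars) == 1:
--         return (chars[0], foundSoFar + 1)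
--
--     count = len(chars)
--     permsPerChar = math.factorial(count - 1)
--     char = chars[0]
--     chars = chars[1:]
--     perms = 0
--     for i in range(0, count):
--         # We want to stop before we overflow the target:
--         if perms + permsPerChar + foundSoFar >= target:
--             return (char, perms + foundSoFar)
--
--         perms = perms + permsPerChar
--         char = chars[0]
--         chars = chars[1:]
-- ===== SOURCE B (Python) =====
-- import math
--
-- def countPermutationsUpTo(chars, foundSoFar, target):
--     # Closed form: instead of slicing off one character per loop iteration,
--     # compute the index k of the block containing `target` by ceiling division.
--     if len(chars) == 1:
--         return (chars[0], foundSoFar + 1)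
--     p = math.factorial(len(chars) - 1)
--     k = max(0, -((foundSoFar - target) // p) - 1)
--     return (chars[k], k * p + foundSoFar)
-- ===== Notes on version B (the rewrite author's own statement) =====
-- stated objective: simpler
-- what changed: Replaced the loop that repeatedly slices the string and accumulates permsPerChar with a closed form: one ceiling division gives the block index k, then a single index into chars.
import Mathlib
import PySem

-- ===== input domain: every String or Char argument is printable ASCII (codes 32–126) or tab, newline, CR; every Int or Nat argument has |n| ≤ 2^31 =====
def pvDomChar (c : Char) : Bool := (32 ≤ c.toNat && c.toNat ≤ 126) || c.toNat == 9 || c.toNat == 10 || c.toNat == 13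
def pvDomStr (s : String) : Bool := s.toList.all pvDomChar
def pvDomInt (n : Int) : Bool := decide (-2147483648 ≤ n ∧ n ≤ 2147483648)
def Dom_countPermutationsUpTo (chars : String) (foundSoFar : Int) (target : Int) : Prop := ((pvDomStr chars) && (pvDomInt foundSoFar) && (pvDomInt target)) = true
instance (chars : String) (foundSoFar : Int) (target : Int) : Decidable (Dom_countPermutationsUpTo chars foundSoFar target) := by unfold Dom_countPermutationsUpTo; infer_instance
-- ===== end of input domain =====

-- B replaces A's slice-and-accumulate loop by a closed-form ceiling division (simpler; the shared factorial dominates cost, so no speed claim).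

-- ===== PORT A =====
-- the for-loop of A: fuel = remaining iterations; state (perms, char, chars-tail) as in the Python
def pvALoop (p target foundSoFar : Int) : Nat → Int → Char → List Char → String × Int
  | 0, perms, char, _ => (String.mk [char], perms + foundSoFar)          -- loop exhausted (Python never reaches this without raising first)
  | Nat.succ n, perms, char, rest =>
      if perms + p + foundSoFar ≥ target then (String.mk [char], perms + foundSoFar)
      else
        match rest with
        | [] => (String.mk [char], perms + foundSoFar)                   -- Python: IndexError here (outside Pre_)
        | c :: rs => pvALoop p target foundSoFar n (perms + p) c rs

def countPermutationsUpTo (chars : String) (foundSoFar : Int) (target : Int) : String × Int :=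
  match chars.toList with
  | [] => ("", foundSoFar)                                               -- Python: ValueError (factorial of -1), outside Pre_
  | [c] => (String.mk [c], foundSoFar + 1)
  | c :: rest => pvALoop ((Nat.factorial rest.length : Nat) : Int) target foundSoFar (rest.length + 1) 0 c rest

-- ===== PORT B =====
def countPermutationsUpTo_alt (chars : String) (foundSoFar : Int) (target : Int) : String × Int :=
  let cs := chars.toList
  if cs.length = 1 then
    ((PySem.List.pyGet? cs 0).elim "" (fun c => String.mk [c]), foundSoFar + 1)
  else
    let p : Int := ((Nat.factorial (cs.length - 1) : Nat) : Int)
    let k : Int := max 0 (-(PySem.Int.floordiv (foundSoFar - target) p) - 1)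
    ((PySem.List.pyGet? cs k).elim "" (fun c => String.mk [c]), k * p + foundSoFar)

-- ===== PRECONDITION & SPEC =====
-- Pre_ excludes exactly the inputs on which Python A raises: the empty string (ValueError from
-- factorial(-1)) and target - foundSoFar > len(chars)! (IndexError when the loop runs off the string).
def Pre_countPermutationsUpTo (chars : String) (foundSoFar : Int) (target : Int) : Prop :=
  1 ≤ chars.toList.length ∧
    (chars.toList.length = 1 ∨ target - foundSoFar ≤ ((Nat.factorial chars.toList.length : Nat) : Int))
instance (chars : String) (foundSoFar : Int) (target : Int) : Decidable (Pre_countPermutationsUpTo chars foundSoFar target) := by unfold Pre_countPermutationsUpTo; infer_instance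
def pvWitness_countPermutationsUpTo : String × Int × Int := ("012", 0, 3)

def Spec_countPermutationsUpTo (chars : String) (foundSoFar : Int) (target : Int) (out : String × Int) : Prop := out = countPermutationsUpTo_alt chars foundSoFar target
instance (chars : String) (foundSoFar : Int) (target : Int) (out : String × Int) : Decidable (Spec_countPermutationsUpTo chars foundSoFar target out) := by unfold Spec_countPermutationsUpTo; infer_instance

-- ===== CLAIM (what is proved, stated in full; the proofs are below) =====
def Claim_equal_countPermutationsUpTo : Prop := ∀ (chars : String) (foundSoFar : Int) (target : Int), Dom_countPermutationsUpTo chars foundSoFar target → Pre_countPermutationsUpTo chars foundSoFar target → Spec_countPermutationsUpTo chars foundSoFar target (countPermutationsUpTo chars foundSoFar target)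

-- ===== LEMMAS AND PROOFS =====

-- the block index B computes, as a function of m = target - foundSoFar - perms
def pvJdx (p m : Int) : Int := max 0 (-(PySem.Int.floordiv (-m) p) - 1)

lemma pvCeil_bounds (p m : Int) (hp : 0 < p) :
    (-(PySem.Int.floordiv (-m) p) - 1) * p < m ∧ m ≤ -(PySem.Int.floordiv (-m) p) * p := by
  have h := PySem.Int.floordiv_mul_add_mod (-m) p
  have h0 := PySem.Int.mod_nonneg (a := -m) (b := p) hp
  have h1 := PySem.Int.mod_lt (a := -m) (b := p) hp
  constructor <;> nlinarith [h, h0, h1]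

lemma pvJdx_zero (p m : Int) (hp : 0 < p) (h : m ≤ p) : pvJdx p m = 0 := by
  have hb := pvCeil_bounds p m hp
  unfold pvJdx
  set q : Int := -(PySem.Int.floordiv (-m) p) with hq
  have : q ≤ 1 := by nlinarith [hb.1, hb.2]
  omega

lemma pvJdx_succ (p m : Int) (hp : 0 < p) (h : p < m) : pvJdx p m = pvJdx p (m - p) + 1 := by
  have hb := pvCeil_bounds p m hp
  have hshift : PySem.Int.floordiv (-(m - p)) p = PySem.Int.floordiv (-m) p + 1 := by
    rw [PySem.Int.floordiv_eq_ediv_of_pos hp, PySem.Int.floordiv_eq_ediv_of_pos hp]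
    have : -(m - p) = -m + 1 * p := by ring
    rw [this, Int.add_mul_ediv_right _ _ (by omega : p ≠ 0)]
  unfold pvJdx
  rw [hshift]
  set q : Int := -(PySem.Int.floordiv (-m) p) with hq
  have hq2 : 2 ≤ q := by nlinarith [hb.1, hb.2]
  omega

lemma pvJdx_nonneg (p m : Int) : 0 ≤ pvJdx p m := le_max_left _ _

-- the loop computes the closed form, provided the target lies within the fuel's blocks
lemma pvALoop_eq (p target foundSoFar : Int) (hp : 0 < p) :
    ∀ (rest : List Char) (c : Char) (perms : Int),
      target - foundSoFar - perms ≤ ((rest.length : Int) + 1) * p →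
      pvALoop p target foundSoFar (rest.length + 1) perms c rest =
        ((PySem.List.pyGet? (c :: rest) (pvJdx p (target - foundSoFar - perms))).elim ""
            (fun ch => String.mk [ch]),
          perms + pvJdx p (target - foundSoFar - perms) * p + foundSoFar) := by
  intro rest
  induction rest with
  | nil =>
      intro c perms hb
      simp only [List.length_nil] at hb
      have hj : pvJdx p (target - foundSoFar - perms) = 0 :=
        pvJdx_zero p _ hp (by omega)
      rw [hj]
      simp [pvALoop]
  | cons c' rs ih =>
      intro c perms hb
      by_cases hstop : perms + p + foundSoFar ≥ target
      · have hj : pvJdx p (target - foundSoFar - perms) = 0 :=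
          pvJdx_zero p _ hp (by omega)
        rw [hj]
        simp [pvALoop, hstop]
      · have hm : p < target - foundSoFar - perms := by omega
        have hj := pvJdx_succ p (target - foundSoFar - perms) hp hm
        have harg : target - foundSoFar - perms - p = target - foundSoFar - (perms + p) := by ring
        have hlen : (rs.length : Int) + 1 ≤ ((c' :: rs).length : Int) + 1 := by
          simp
        have hb' : target - foundSoFar - (perms + p) ≤ ((rs.length : Int) + 1) * p := by
          simp only [List.length_cons] at hb
          push_cast at hb ⊢
          nlinarith [hb]
        have := ih c' (perms + p) hb'
        show pvALoop p target foundSoFar (Nat.succ (rs.length + 1)) perms c (c' :: rs) = _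
        rw [pvALoop]
        rw [if_neg (by omega : ¬ perms + p + foundSoFar ≥ target)]
        show pvALoop p target foundSoFar (rs.length + 1) (perms + p) c' rs = _
        rw [this, hj, harg]
        set j := pvJdx p (target - foundSoFar - (perms + p)) with hjdef
        have hjn : 0 ≤ j := pvJdx_nonneg _ _
        simp only [Prod.mk.injEq]
        constructor
        · -- pyGet? shift by one on a cons for a nonnegative index
          have h1 : PySem.List.pyGet? (c :: c' :: rs) (j + 1) = PySem.List.pyGet? (c' :: rs) j := by
            rw [PySem.List.pyGet?_of_nonneg _ (by omega : (0:Int) ≤ j + 1), PySem.List.pyGet?_of_nonneg _ hjn]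
            have : (j + 1).toNat = j.toNat + 1 := by omega
            rw [this]
            simp
          rw [h1]
        · ring

-- ===== VERDICT (by name: the statement is the Claim_ definition above) =====
theorem countPermutationsUpTo_spec : Claim_equal_countPermutationsUpTo := by
  intro chars foundSoFar target _hdom hpre
  obtain ⟨hlen, hcase⟩ := hpre
  unfold Spec_countPermutationsUpTo countPermutationsUpTo countPermutationsUpTo_alt
  cases hcs : chars.toList with
  | nil => simp [hcs] at hlen
  | cons c rest =>
      cases rest with
      | nil =>
          simp
      | cons c' rs =>
          have hne : ¬ (c :: c' :: rs).length = 1 := by simp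
          rw [hcs] at hcase
          have hbound : target - foundSoFar ≤ (((c' :: rs).length : Int) + 1) * ((Nat.factorial (c' :: rs).length : Nat) : Int) := by
            rcases hcase with h1 | h2
            · simp at h1
            · have : Nat.factorial (c :: c' :: rs).length = ((c' :: rs).length + 1) * Nat.factorial (c' :: rs).length := by
                simp [Nat.factorial_succ]
              rw [this] at h2
              push_cast at h2 ⊢
              linarith
          have hp : (0 : Int) < ((Nat.factorial (c' :: rs).length : Nat) : Int) := by
            exact_mod_cast Nat.factorial_pos _
          have := pvALoop_eq ((Nat.factorial (c' :: rs).length : Nat) : Int) target foundSoFar hp (c' :: rs) c 0 (by omega)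
          simp only [if_neg hne]
          rw [this]
          have hlf : (c :: c' :: rs).length - 1 = (c' :: rs).length := by simp
          have hm : target - foundSoFar - 0 = target - foundSoFar := by ring
          have hk : max 0 (-(PySem.Int.floordiv (foundSoFar - target) ((Nat.factorial (c' :: rs).length : Nat) : Int)) - 1)
              = pvJdx ((Nat.factorial (c' :: rs).length : Nat) : Int) (target - foundSoFar) := by
            unfold pvJdx
            have : foundSoFar - target = -(target - foundSoFar) := by ring
            rw [this]
          rw [hm, hlf, hk]
          set j := pvJdx ((Nat.factorial (c' :: rs).length : Nat) : Int) (target - foundSoFar)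
          simp only [Prod.mk.injEq]
          refine ⟨trivial, by ring⟩
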